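-- pv_equiv track=rewrite | github.com/sshnguyen/LeetCode-Practice | Python/CodeSignal/Industry Framework/Worker Register/level1.py | solution
-- ===== SOURCE A (Python) =====
-- class WorkerRegister:
--     def __init__(self):
--         self.workers = {}  # workerId -> {position, compensation, sessions, current_session}
--
--     def add_worker(self, worker_id, position, compensation):
--         if worker_id in self.workers:
--             return "invalid_request"
--
--         self.workers[worker_id] = {
--             'position': position,
--             'compensation': compensation,
--             'sessions': [],  # [(start_time, end_time), ...]
--             'current_session': None
--         }
--         return "success"
--
--     def register(self, worker_id, timestamp, action):
--         if worker_id not in self.workers: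
--             return "invalid_request"
--
--         worker = self.workers[worker_id]
--
--         if action == "enter":
--             if worker['current_session'] is not None:
--                 return "invalid_request"  # Already in office
--             worker['current_session'] = timestamp
--             return "success"
--
--         elif action == "leave":
--             if worker['current_session'] is None:
--                 return "invalid_request"  # Not in office
--
--             start_time = worker['current_session']
--             worker['sessions'].append((start_time, timestamp))
--             worker['current_session'] = None
--             return "success"
--
--         return "invalid_request"
--
--     def get_time_spent(self, worker_id):
--         if worker_id not in self.workers:
--             return ""
--
--         worker = self.workers[worker_id]
--         total_time = 0
--
--         # Sum up all completed sessions
--         for start_time, end_time in worker['sessions']: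
--             total_time += end_time - start_time
--
--         return str(total_time)
--
-- def solution(queries):
--     register = WorkerRegister()
--     results = []
--
--     for query in queries:
--         operation = query[0]
--
--         if operation == "ADD_WORKER":
--             worker_id, position, compensation = query[1], query[2], int(query[3])
--             result = register.add_worker(worker_id, position, compensation)
--             results.append(result)
--
--         elif operation == "REGISTER":
--             worker_id, timestamp, action = query[1], int(query[2]), query[3]
--             result = register.register(worker_id, timestamp, action)
--             results.append(result)
--
--         elif operation == "GET":
--             worker_id = query[1]
--             result = register.get_time_spent(worker_id)
--             results.append(result)
--
--     return results
-- ===== SOURCE B (Python) =====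
-- def solution(queries):
--     state = {}  # worker_id -> [running_total_of_closed_sessions, open_session_start_or_None]
--     out = []
--     for q in queries:
--         op = q[0]
--         if op == "ADD_WORKER":
--             if q[1] in state:
--                 out.append("invalid_request")
--             else:
--                 state[q[1]] = [0, None]
--                 out.append("success")
--         elif op == "REGISTER":
--             wid, ts, act = q[1], int(q[2]), q[3]
--             w = state.get(wid)
--             if w is None:
--                 out.append("invalid_request")
--             elif act == "enter":
--                 if w[1] is None:
--                     w[1] = ts
--                     out.append("success")
--                 else:
--                     out.append("invalid_request")
--             elif act == "leave":
--                 if w[1] is None: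
--                     out.append("invalid_request")
--                 else:
--                     w[0] += ts - w[1]
--                     w[1] = None
--                     out.append("success")
--             else:
--                 out.append("invalid_request")
--         elif op == "GET":
--             w = state.get(q[1])
--             out.append(str(w[0]) if w is not None else "")
--     return out
-- ===== Notes on version B (the rewrite author's own statement) =====
-- stated objective: alternative
-- what changed: B drops A's WorkerRegister class with its per-worker list of (start,end) sessions re-summed on every GET, keeping instead one running total per worker updated incrementally on each leave, so GET is O(1).
import Mathlib
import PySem

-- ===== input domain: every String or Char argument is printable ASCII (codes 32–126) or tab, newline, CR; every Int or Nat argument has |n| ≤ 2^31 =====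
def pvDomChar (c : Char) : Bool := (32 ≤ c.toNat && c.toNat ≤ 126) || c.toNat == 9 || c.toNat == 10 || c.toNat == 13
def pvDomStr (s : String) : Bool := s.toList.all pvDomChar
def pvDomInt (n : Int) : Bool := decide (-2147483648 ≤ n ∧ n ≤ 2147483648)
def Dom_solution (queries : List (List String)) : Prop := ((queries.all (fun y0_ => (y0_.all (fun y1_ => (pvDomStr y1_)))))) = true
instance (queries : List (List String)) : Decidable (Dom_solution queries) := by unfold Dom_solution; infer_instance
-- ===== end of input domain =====

-- B replaces A's per-worker session list (re-summed on every GET) by a running total updated on each leave (alternative state, same measured cost).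


-- ===== PORT A =====
-- worker record: the fixed-key dict {'position','compensation','sessions','current_session'}
structure WRec where
  position : String
  compensation : Int
  sessions : List (Int × Int)
  currentSession : Option Int
deriving Repr, DecidableEq

def wrAddWorker (reg : PySem.Dict String WRec) (workerId position : String) (compensation : Int) :
    PySem.Dict String WRec × String :=
  if reg.contains workerId then (reg, "invalid_request")
  else (reg.insert workerId ⟨position, compensation, [], none⟩, "success")

def wrRegister (reg : PySem.Dict String WRec) (workerId : String) (timestamp : Int) (action : String) :
    PySem.Dict String WRec × String :=
  if reg.contains workerId = false then (reg, "invalid_request")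
  else
    let w := (reg.get? workerId).getD ⟨"", 0, [], none⟩
    if action = "enter" then
      match w.currentSession with
      | some _ => (reg, "invalid_request")
      | none => (reg.insert workerId { w with currentSession := some timestamp }, "success")
    else if action = "leave" then
      match w.currentSession with
      | none => (reg, "invalid_request")
      | some startTime =>
          (reg.insert workerId { w with sessions := w.sessions ++ [(startTime, timestamp)],
                                        currentSession := none }, "success")
    else (reg, "invalid_request")

def wrGetTimeSpent (reg : PySem.Dict String WRec) (workerId : String) : String :=
  if reg.contains workerId = false then ""
  else
    let w := (reg.get? workerId).getD ⟨"", 0, [], none⟩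
    PySem.Int.toStr (w.sessions.foldl (fun total p => total + (p.2 - p.1)) 0)

def solStep (st : PySem.Dict String WRec × List String) (query : List String) :
    PySem.Dict String WRec × List String :=
  let operation := PySem.List.pyGetD query 0 ""
  if operation = "ADD_WORKER" then
    let workerId := PySem.List.pyGetD query 1 ""
    let position := PySem.List.pyGetD query 2 ""
    let compensation := (PySem.Int.ofStr? (PySem.List.pyGetD query 3 "")).getD 0
    let r := wrAddWorker st.1 workerId position compensation
    (r.1, st.2 ++ [r.2])
  else if operation = "REGISTER" then
    let workerId := PySem.List.pyGetD query 1 ""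
    let timestamp := (PySem.Int.ofStr? (PySem.List.pyGetD query 2 "")).getD 0
    let action := PySem.List.pyGetD query 3 ""
    let r := wrRegister st.1 workerId timestamp action
    (r.1, st.2 ++ [r.2])
  else if operation = "GET" then
    (st.1, st.2 ++ [wrGetTimeSpent st.1 (PySem.List.pyGetD query 1 "")])
  else st

def solution (queries : List (List String)) : List String :=
  (queries.foldl solStep (PySem.Dict.empty, [])).2

-- ===== PORT B =====
def altStep (st : PySem.Dict String (Int × Option Int) × List String) (q : List String) :
    PySem.Dict String (Int × Option Int) × List String :=
  let op := PySem.List.pyGetD q 0 ""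
  if op = "ADD_WORKER" then
    if st.1.contains (PySem.List.pyGetD q 1 "") then (st.1, st.2 ++ ["invalid_request"])
    else (st.1.insert (PySem.List.pyGetD q 1 "") (0, none), st.2 ++ ["success"])
  else if op = "REGISTER" then
    let wid := PySem.List.pyGetD q 1 ""
    let ts := (PySem.Int.ofStr? (PySem.List.pyGetD q 2 "")).getD 0
    let act := PySem.List.pyGetD q 3 ""
    match st.1.get? wid with
    | none => (st.1, st.2 ++ ["invalid_request"])
    | some w =>
      if act = "enter" then
        match w.2 with
        | none => (st.1.insert wid (w.1, some ts), st.2 ++ ["success"])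
        | some _ => (st.1, st.2 ++ ["invalid_request"])
      else if act = "leave" then
        match w.2 with
        | none => (st.1, st.2 ++ ["invalid_request"])
        | some s => (st.1.insert wid (w.1 + (ts - s), none), st.2 ++ ["success"])
      else (st.1, st.2 ++ ["invalid_request"])
  else if op = "GET" then
    match st.1.get? (PySem.List.pyGetD q 1 "") with
    | none => (st.1, st.2 ++ [""])
    | some w => (st.1, st.2 ++ [PySem.Int.toStr w.1])
  else st

def solution_alt (queries : List (List String)) : List String :=
  (queries.foldl altStep (PySem.Dict.empty, [])).2

-- ===== PRECONDITION & SPEC =====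
-- per-query condition for A to return normally: a query must be nonempty, ADD_WORKER/REGISTER
-- queries need 4 fields with an int-parseable field 3 (resp. 2), GET needs 2 fields; otherwise
-- Python A raises IndexError/ValueError, so Pre_ excludes exactly those inputs.
def qOkA (q : List String) : Bool :=
  match q with
  | [] => false
  | op :: _ =>
    if op = "ADD_WORKER" then
      decide (4 ≤ q.length) && (PySem.Int.ofStr? (PySem.List.pyGetD q 3 "")).isSome
    else if op = "REGISTER" then
      decide (4 ≤ q.length) && (PySem.Int.ofStr? (PySem.List.pyGetD q 2 "")).isSome
    else if op = "GET" then decide (2 ≤ q.length)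
    else true

def Pre_solution (queries : List (List String)) : Prop := queries.all qOkA = true
instance (queries : List (List String)) : Decidable (Pre_solution queries) := by
  unfold Pre_solution; infer_instance

def pvWitness_solution : List (List String) :=
  [["ADD_WORKER", "w", "dev", "100"], ["REGISTER", "w", "5", "enter"],
   ["REGISTER", "w", "12", "leave"], ["GET", "w"], ["GET", "z"]]

def Spec_solution (queries : List (List String)) (out : List String) : Prop := out = solution_alt queries
instance (queries : List (List String)) (out : List String) : Decidable (Spec_solution queries out) := by unfold Spec_solution; infer_instance

-- ===== CLAIM (what is proved, stated in full; the proofs are below) =====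
def Claim_equal_solution : Prop := ∀ (queries : List (List String)), Dom_solution queries → Pre_solution queries → Spec_solution queries (solution queries)

-- ===== LEMMAS AND PROOFS =====

-- abstraction: B's per-worker state is A's record collapsed to (sum of closed sessions, open session)
def absW (w : WRec) : Int × Option Int :=
  (w.sessions.foldl (fun total p => total + (p.2 - p.1)) 0, w.currentSession)

def mapVal (f : WRec → Int × Option Int) (d : PySem.Dict String WRec) :
    PySem.Dict String (Int × Option Int) :=
  PySem.Dict.mk (d.items.map (fun p => (p.1, f p.2)))

lemma mapVal_contains (f : WRec → Int × Option Int) (d : PySem.Dict String WRec) (k : String) :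
    (mapVal f d).contains k = d.contains k := by
  simp only [mapVal, PySem.Dict.contains, List.any_map]
  rfl

lemma mapVal_get? (f : WRec → Int × Option Int) (d : PySem.Dict String WRec) (k : String) :
    (mapVal f d).get? k = (d.get? k).map f := by
  simp only [mapVal, PySem.Dict.get?, List.find?_map, Option.map_map]
  rfl

lemma mapVal_insert (f : WRec → Int × Option Int) (d : PySem.Dict String WRec) (k : String) (v : WRec) :
    mapVal f (d.insert k v) = (mapVal f d).insert k (f v) := by
  simp only [mapVal, PySem.Dict.insert]
  by_cases hc : d.contains k
  · simp only [hc, if_true, List.map_map]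
    have : (mapVal f d).contains k = true := by rw [mapVal_contains]; exact hc
    simp only [mapVal] at this
    simp only [this, if_true]
    congr 1
    apply List.map_congr_left
    intro p _
    by_cases h : p.1 = k <;> simp [h]
  · have : (mapVal f d).contains k = false := by rw [mapVal_contains]; simpa using hc
    simp only [mapVal] at this
    simp [hc, this]

lemma step_sim (regA : PySem.Dict String WRec) (res : List String) (q : List String) :
    altStep (mapVal absW regA, res) q
      = (mapVal absW (solStep (regA, res) q).1, (solStep (regA, res) q).2) := by
  unfold altStep solStep wrAddWorker wrRegister wrGetTimeSpent
  by_cases h1 : PySem.List.pyGetD q 0 "" = "ADD_WORKER"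
  · simp only [h1, if_true, mapVal_contains]
    by_cases hc : regA.contains (PySem.List.pyGetD q 1 "")
    · simp [hc]
    · simp [hc, mapVal_insert, absW]
  · simp only [h1, if_false]
    by_cases h2 : PySem.List.pyGetD q 0 "" = "REGISTER"
    · simp only [h2, if_true]
      rcases hg : regA.get? (PySem.List.pyGetD q 1 "") with _ | w
      · have hc : regA.contains (PySem.List.pyGetD q 1 "") = false := by
          rw [PySem.Dict.contains_eq_isSome_get?, hg]; rfl
        simp [mapVal_get?, hg, hc]
      · have hc : regA.contains (PySem.List.pyGetD q 1 "") = true := by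
          rw [PySem.Dict.contains_eq_isSome_get?, hg]; rfl
        simp only [mapVal_get?, hg, Option.map_some, hc, Bool.true_eq_false, if_false]
        by_cases ha : PySem.List.pyGetD q 3 "" = "enter"
        · rcases hcs : w.currentSession with _ | st
          · simp [ha, hcs, mapVal_insert, absW]
          · simp [ha, hcs, absW]
        · by_cases hl : PySem.List.pyGetD q 3 "" = "leave"
          · rcases hcs : w.currentSession with _ | st
            · simp [hl, hcs, absW]
            · simp [hl, hcs, absW, mapVal_insert]
          · simp [ha, hl, absW]
    · simp only [h2, if_false]
      by_cases h3 : PySem.List.pyGetD q 0 "" = "GET"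
      · simp only [h3, if_true]
        rcases hg : regA.get? (PySem.List.pyGetD q 1 "") with _ | w
        · have hc : regA.contains (PySem.List.pyGetD q 1 "") = false := by
            rw [PySem.Dict.contains_eq_isSome_get?, hg]; rfl
          simp [mapVal_get?, hg, hc]
        · have hc : regA.contains (PySem.List.pyGetD q 1 "") = true := by
            rw [PySem.Dict.contains_eq_isSome_get?, hg]; rfl
          simp [mapVal_get?, hg, hc, absW]
      · simp [h3]

lemma loop_sim (queries : List (List String)) (regA : PySem.Dict String WRec) (res : List String) :
    queries.foldl altStep (mapVal absW regA, res)
      = (mapVal absW (queries.foldl solStep (regA, res)).1,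
         (queries.foldl solStep (regA, res)).2) := by
  induction queries generalizing regA res with
  | nil => simp
  | cons q qs ih =>
      simp only [List.foldl_cons, step_sim]
      exact ih _ _

-- ===== VERDICT (by name: the statement is the Claim_ definition above) =====
theorem solution_spec : Claim_equal_solution := by
  intro queries _ _
  unfold Spec_solution solution solution_alt
  have h0 : (PySem.Dict.empty : PySem.Dict String (Int × Option Int)) = mapVal absW PySem.Dict.empty := rfl
  rw [h0, loop_sim]
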